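-- pv_equiv track=rewrite | github.com/honggoii/ProblemSolving | Programmers/20210607/4.py | solution
-- ===== SOURCE A (Python) =====
-- def solution(new_id):
--     answer = ''
--     new_id = new_id.lower() # 1. 소문자 치환
--
--     # 2. 소문자, 숫자, -, _, . 제외 문자 제거
--     alpha = 'abcdefghijklmnopqrstuvwxyz'
--     digit = '0123456789'
--     characters = '-_.'
--     #characters = "~!@#$%^&*()+=`\|"
--     #new_id = ''.join(x for x in new_id if x not in characters)
--     for i in new_id:
--         if i in alpha or i in digit or i in characters:
--             answer += i
--     new_id = ""
--     cnt = 0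
--     # 3. 마침표 2번 이상 -> 마침표 하나로
--     for i in answer:
--         if i == '.':
--             cnt += 1
--         else:
--             if cnt >= 1:
--                 new_id += '.'
--                 new_id += i
--                 cnt = 0
--             else:
--                 new_id += i
--
--     # 4. 마침표가 처음이나 끝이면 제거
--     if len(new_id) != 0 and new_id[0] == '.':
--         new_id = new_id[1:len(new_id)]
--     if len(new_id) != 0 and new_id[len(new_id)-1] == '.':
--         new_id = new_id[0:len(new_id)]
--
--     # 5. 빈 문자열이면 "a" 대입
--     if len(new_id) == 0:
--         new_id += 'a'
--
--     # 7. 길이가 2자 이하, 길이가 3될 때까지 마지막 문자 반복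
--     if len(new_id) <= 2:
--         tmp = new_id[len(new_id)-1]
--         for i in range(len(new_id), 3):
--             new_id += tmp
--     # 6. 길이가 16자 이상, 15개 문자외 제거, 마침표가 맨 끝이면 제거
--     elif len(new_id) >= 16:
--         new_id = new_id[0:15]
--         if new_id[14] == '.':
--             new_id = new_id[:14]
--
--     answer = new_id
--     return answer
-- ===== SOURCE B (Python) =====
-- def solution(new_id):
--     # one fused pass: lowercase, keep only allowed chars, collapse dot runs
--     out = []
--     for c in new_id.lower():
--         if c not in 'abcdefghijklmnopqrstuvwxyz0123456789-_.':
--             continue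
--         if c == '.' and out and out[-1] == '.':
--             continue
--         out.append(c)
--     s = ''.join(out).strip('.')
--     if not s:
--         s = 'a'
--     if len(s) < 3:
--         s += s[-1] * (3 - len(s))
--     return s[:15].rstrip('.')
-- ===== Notes on version B (the rewrite author's own statement) =====
-- stated objective: simpler
-- what changed: A's two accumulation loops (character filter pass, then a dot-counting state machine) plus four separate edge fix-ups are replaced by one fused pass that filters and collapses dot runs as it goes, followed by a strip of edge dots, pad-to-3, and an unconditional truncate-to-15 with trailing-dot removal; the single list-append pass also avoids A's repeated string concatenation.
import Mathlib
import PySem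

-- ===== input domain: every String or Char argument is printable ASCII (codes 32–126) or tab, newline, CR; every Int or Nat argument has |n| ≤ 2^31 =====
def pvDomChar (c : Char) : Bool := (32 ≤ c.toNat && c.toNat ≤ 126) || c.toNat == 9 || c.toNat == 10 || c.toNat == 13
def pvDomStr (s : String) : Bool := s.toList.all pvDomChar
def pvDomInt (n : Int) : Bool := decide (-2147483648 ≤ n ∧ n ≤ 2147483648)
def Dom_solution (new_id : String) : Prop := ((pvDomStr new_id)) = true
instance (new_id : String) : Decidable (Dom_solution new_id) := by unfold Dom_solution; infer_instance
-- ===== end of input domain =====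

-- B replaces A's two accumulation loops (filter pass + dot-counting state machine) and four
-- explicit edge fix-ups by ONE fused pass that filters and collapses dot runs, then strip('.'),
-- pad, truncate+rstrip — simpler; return values proved equal on all inputs.

-- ===== PORT A =====
def pvAlpha : List Char := "abcdefghijklmnopqrstuvwxyz".toList
def pvDigit : List Char := "0123456789".toList
def pvPunct : List Char := "-_.".toList

-- step 2 loop body: answer += i if i in alpha or i in digit or i in characters
def pvAStep2 (answer : List Char) (i : Char) : List Char :=
  if pvAlpha.contains i || pvDigit.contains i || pvPunct.contains i then answer ++ [i] else answer

-- step 3 loop body over state (new_id, cnt)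
def pvAStep3 (st : List Char × Int) (i : Char) : List Char × Int :=
  if i = '.' then (st.1, st.2 + 1)
  else if st.2 ≥ 1 then (st.1 ++ ['.', i], 0) else (st.1 ++ [i], 0)

def pvSolutionChars (cs : List Char) : List Char :=
  let cs1 := PySem.Chars.lower cs
  let answer := cs1.foldl pvAStep2 []
  let st := answer.foldl pvAStep3 ([], (0 : Int))
  let n1 := st.1
  let n2 := if n1.length ≠ 0 ∧ PySem.List.pyGet? n1 0 = some '.'
            then PySem.List.slice n1 (some 1) (some n1.length) else n1
  let n3 := if n2.length ≠ 0 ∧ PySem.List.pyGet? n2 ((n2.length : Int) - 1) = some '.'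
            then PySem.List.slice n2 (some 0) (some n2.length) else n2
  let n4 := if n3.length = 0 then n3 ++ ['a'] else n3
  if n4.length ≤ 2 then
    -- tmp = new_id[len(new_id)-1]; guarded total form (n4 is nonempty here)
    let tmp := PySem.List.pyGetD n4 ((n4.length : Int) - 1) 'a'
    (PySem.List.pyRange n4.length 3 1).foldl (fun acc _ => acc ++ [tmp]) n4
  else if 16 ≤ n4.length then
    let w := PySem.List.slice n4 (some 0) (some 15)
    if PySem.List.pyGet? w 14 = some '.' then PySem.List.slice w none (some 14) else w
  else n4

def solution (new_id : String) : String := String.ofList (pvSolutionChars new_id.toList)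

-- ===== PORT B =====
def pvBAllowed (c : Char) : Bool := ("abcdefghijklmnopqrstuvwxyz0123456789-_.".toList).contains c

-- fused loop body: skip disallowed chars, skip a '.' that would duplicate the previous one
def pvBStep (out : List Char) (c : Char) : List Char :=
  if ¬ pvBAllowed c then out
  else if c = '.' ∧ out ≠ [] ∧ PySem.List.pyGet? out (-1) = some '.' then out
  else out ++ [c]

-- hand port of s.rstrip('.') (PySem has no rstrip-with-chars): exact — drops trailing '.' runs
def pvRstripDot (u : List Char) : List Char := (u.reverse.dropWhile (fun c => c == '.')).reverse

def pvSolutionAltChars (cs : List Char) : List Char :=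
  let out := (PySem.Chars.lower cs).foldl pvBStep []
  let s1 := PySem.Chars.stripChars out ['.']
  let s2 := if s1 = [] then ['a'] else s1
  let s3 := if s2.length < 3
            then s2 ++ List.replicate (3 - s2.length) (PySem.List.pyGetD s2 (-1) 'a') else s2
  pvRstripDot (PySem.List.slice s3 none (some 15))

def solution_alt (new_id : String) : String := String.ofList (pvSolutionAltChars new_id.toList)

-- ===== PRECONDITION & SPEC =====
def Spec_solution (new_id : String) (out : String) : Prop := out = solution_alt new_id
instance (new_id : String) (out : String) : Decidable (Spec_solution new_id out) := by unfold Spec_solution; infer_instance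

-- ===== CLAIM (what is proved, stated in full; the proofs are below) =====
def Claim_equal_solution : Prop := ∀ (new_id : String), Dom_solution new_id → Spec_solution new_id (solution new_id)

-- ===== LEMMAS AND PROOFS =====

-- "no two adjacent dots"
def pvNoDD : List Char → Prop
  | a :: b :: t => (a ≠ '.' ∨ b ≠ '.') ∧ pvNoDD (b :: t)
  | _ => True

theorem pvNoDD_append_singleton {s : List Char} {c : Char}
    (hd : s.getLast? ≠ some '.' ∨ c ≠ '.') (h : pvNoDD s) : pvNoDD (s ++ [c]) := by
  induction s with
  | nil => simp [pvNoDD]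
  | cons a t ih =>
    cases t with
    | nil =>
      simp only [List.getLast?_singleton] at hd
      refine ⟨?_, trivial⟩
      rcases hd with hd | hd
      · exact Or.inl (by simpa using hd)
      · exact Or.inr hd
    | cons b t' =>
      refine ⟨h.1, ih ?_ h.2⟩
      simpa [List.getLast?_cons_cons] using hd

theorem pvNoDD_take : ∀ (l : List Char) (k : Nat), pvNoDD l → pvNoDD (l.take k)
  | [], _, _ => by simp [pvNoDD]
  | _ :: _, 0, _ => trivial
  | a :: t, k + 1, h => by
    cases t with
    | nil => cases k <;> simp [pvNoDD]
    | cons b t' =>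
      cases k with
      | zero => simp [pvNoDD]
      | succ k' => exact ⟨h.1, pvNoDD_take (b :: t') (k' + 1) h.2⟩

theorem pvNoDD_last_of_append_dot : ∀ {u : List Char}, pvNoDD (u ++ ['.']) → u.getLast? ≠ some '.'
  | [], _ => by simp
  | [a], h => by
    simp only [List.cons_append, List.nil_append] at h
    rcases h.1 with h1 | h1
    · simpa using h1
    · simp at h1
  | a :: b :: t, h => by
    rw [List.getLast?_cons_cons]
    exact pvNoDD_last_of_append_dot (u := b :: t) h.2

theorem pv_clamp (n : Nat) (i : Int) (h0 : 0 ≤ i) : PySem.List.clampIdx n i = min i.toNat n := by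
  simp [PySem.List.clampIdx, not_lt.2 h0]

theorem pv_slice_take {α : Type} (v : List α) (b : Int) (hb : 0 ≤ b) :
    PySem.List.slice v (some 0) (some b) = v.take b.toNat := by
  simp only [PySem.List.slice, pv_clamp _ _ hb, pv_clamp _ 0 (by omega)]
  rw [show min (0:Int).toNat v.length = 0 by simp]
  rw [Nat.sub_zero, List.drop_zero, ← List.take_length (l := v), List.take_take]
  simp

theorem pv_slice_none_take {α : Type} (v : List α) (b : Int) (hb : 0 ≤ b) :
    PySem.List.slice v none (some b) = v.take b.toNat := by
  simp only [PySem.List.slice, pv_clamp _ _ hb]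
  rw [Nat.sub_zero, List.drop_zero, ← List.take_length (l := v), List.take_take]
  simp

theorem pv_slice_one_len {α : Type} (v : List α) (h : v ≠ []) :
    PySem.List.slice v (some 1) (some ↑v.length) = v.tail := by
  have hl : 0 < v.length := List.length_pos_iff.2 h
  simp only [PySem.List.slice, pv_clamp _ _ (by omega : (0:Int) ≤ 1),
    pv_clamp _ _ (by omega : (0:Int) ≤ ↑v.length)]
  rw [show min (1:Int).toNat v.length = 1 by omega,
    show min (↑v.length:Int).toNat v.length = v.length by omega]
  rw [List.drop_one]
  exact List.take_of_length_le (by simp)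

theorem pv_allowed_eq (c : Char) :
    (pvAlpha.contains c || pvDigit.contains c || pvPunct.contains c) = pvBAllowed c := by
  have h : ("abcdefghijklmnopqrstuvwxyz0123456789-_.".toList) = pvAlpha ++ pvDigit ++ pvPunct := by
    decide
  simp [pvBAllowed, h, Bool.or_assoc]

-- A's step-2 loop is filter
theorem pvA_filter (l : List Char) :
    l.foldl pvAStep2 [] = l.filter (fun c => pvAlpha.contains c || pvDigit.contains c || pvPunct.contains c) := by
  have h := PySem.List.foldl_append_if
      (fun c => pvAlpha.contains c || pvDigit.contains c || pvPunct.contains c) (fun x => x) l []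
  simp only [List.map_id_fun', id, List.nil_append] at h
  rw [← h]
  rfl

-- B's fused loop body, with the filter test split off
def pvGB (out : List Char) (c : Char) : List Char :=
  if c = '.' ∧ out ≠ [] ∧ PySem.List.pyGet? out (-1) = some '.' then out else out ++ [c]

theorem pvB_filter (l : List Char) :
    l.foldl pvBStep [] = (l.filter pvBAllowed).foldl pvGB [] := by
  rw [List.foldl_filter]
  congr 1
  funext out c
  by_cases h : pvBAllowed c <;> simp [pvBStep, pvGB, h]

def pvDotIf (cnt : Int) : List Char := if 1 ≤ cnt then ['.'] else []

-- main invariant linking A's dot-counting state machine and B's collapse loop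
theorem pv_inv : ∀ (ws s : List Char) (cnt : Int), 0 ≤ cnt → s.getLast? ≠ some '.' → pvNoDD s →
    ws.foldl pvGB (s ++ pvDotIf cnt) = (ws.foldl pvAStep3 (s, cnt)).1 ++ pvDotIf (ws.foldl pvAStep3 (s, cnt)).2
    ∧ 0 ≤ (ws.foldl pvAStep3 (s, cnt)).2
    ∧ (ws.foldl pvAStep3 (s, cnt)).1.getLast? ≠ some '.'
    ∧ pvNoDD (ws.foldl pvAStep3 (s, cnt)).1 := by
  intro ws
  induction ws with
  | nil => exact fun s cnt h0 hl hn => ⟨rfl, h0, hl, hn⟩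
  | cons c ws ih =>
    intro s cnt h0 hl hn
    simp only [List.foldl_cons]
    by_cases hc : c = '.'
    · subst hc
      by_cases h1 : (1:Int) ≤ cnt
      · have hout : pvGB (s ++ pvDotIf cnt) '.' = s ++ pvDotIf cnt := by
          simp only [pvGB, pvDotIf, if_pos h1]
          rw [if_pos]
          exact ⟨trivial, by simp, by rw [PySem.List.pyGet?_neg_one, List.getLast?_concat]⟩
        have hstep : pvAStep3 (s, cnt) '.' = (s, cnt + 1) := by simp [pvAStep3]
        rw [hout, hstep]
        have hd : pvDotIf cnt = pvDotIf (cnt + 1) := by simp [pvDotIf, h1]; omega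
        rw [hd]
        exact ih s (cnt + 1) (by omega) hl hn
      · have hc0 : cnt = 0 := by omega
        subst hc0
        have hout : pvGB (s ++ pvDotIf 0) '.' = s ++ ['.'] := by
          simp only [pvDotIf]
          rw [if_neg (by norm_num), List.append_nil, pvGB, if_neg]
          rintro ⟨-, hne, hlast⟩
          rw [PySem.List.pyGet?_neg_one] at hlast
          exact hl hlast
        have hstep : pvAStep3 (s, 0) '.' = (s, 1) := by simp [pvAStep3]
        rw [hout, hstep]
        have hds : s ++ ['.'] = s ++ pvDotIf 1 := by simp [pvDotIf]
        rw [hds]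
        exact ih s 1 (by omega) hl hn
    · by_cases h1 : (1:Int) ≤ cnt
      · have hout : pvGB (s ++ pvDotIf cnt) c = (s ++ ['.', c]) ++ pvDotIf 0 := by
          unfold pvGB
          rw [if_neg (by rintro ⟨h,-,-⟩; exact hc h)]
          simp [pvDotIf, h1]
        have hstep : pvAStep3 (s, cnt) c = (s ++ ['.', c], 0) := by
          simp [pvAStep3, hc, h1]
        rw [hout, hstep]
        refine ih (s ++ ['.', c]) 0 le_rfl ?_ ?_
        · rw [show s ++ ['.', c] = (s ++ ['.']) ++ [c] by simp, List.getLast?_concat]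
          simpa using hc
        · rw [show s ++ ['.', c] = (s ++ ['.']) ++ [c] by simp]
          exact pvNoDD_append_singleton (Or.inr hc)
            (pvNoDD_append_singleton (Or.inl hl) hn)
      · have hc0 : cnt = 0 := by omega
        subst hc0
        have hout : pvGB (s ++ pvDotIf 0) c = (s ++ [c]) ++ pvDotIf 0 := by
          unfold pvGB
          rw [if_neg (by rintro ⟨h,-,-⟩; exact hc h)]
          simp [pvDotIf]
        have hstep : pvAStep3 (s, 0) c = (s ++ [c], 0) := by
          simp [pvAStep3, hc]
        rw [hout, hstep]
        refine ih (s ++ [c]) 0 le_rfl ?_ ?_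
        · rw [List.getLast?_concat]; simpa using hc
        · exact pvNoDD_append_singleton (Or.inl hl) hn

theorem pv_dropWhile_dot_eq_self {v : List Char} (h : v.head? ≠ some '.') :
    v.dropWhile (fun c => c == '.') = v := by
  cases v with
  | nil => simp
  | cons a t => simp only [List.head?_cons, ne_eq, Option.some.injEq] at h; simp [h]

theorem pv_rstrip_append_dotIf {v : List Char} (cnt : Int) (h : v.getLast? ≠ some '.') :
    ((v ++ pvDotIf cnt).reverse.dropWhile (fun c => c == '.')).reverse = v := by
  have hh : v.reverse.head? ≠ some '.' := by rwa [List.head?_reverse]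
  by_cases h1 : (1:Int) ≤ cnt
  · simp only [pvDotIf, if_pos h1, List.reverse_append, List.reverse_singleton,
      List.singleton_append, List.dropWhile_cons]
    simp [pv_dropWhile_dot_eq_self hh]
  · simp only [pvDotIf, if_neg h1, List.append_nil]
    simp [pv_dropWhile_dot_eq_self hh]

theorem pv_contains_dot : (fun c => (['.'] : List Char).contains c) = (fun c => c == '.') := by
  funext c; by_cases h : c = '.' <;> simp [h, List.contains_eq_mem]

theorem pv_strip_eq {s : List Char} (cnt : Int)
    (hl : s.getLast? ≠ some '.') (hn : pvNoDD s) :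
    PySem.Chars.stripChars (s ++ pvDotIf cnt) ['.'] = if s.head? = some '.' then s.tail else s := by
  simp only [PySem.Chars.stripChars, pv_contains_dot]
  cases s with
  | nil =>
    by_cases h1 : (1:Int) ≤ cnt
    · rw [show pvDotIf cnt = ['.'] from by simp [pvDotIf, h1]]
      decide
    · rw [show pvDotIf cnt = [] from by simp [pvDotIf, h1]]
      decide
  | cons a t =>
    by_cases ha : a = '.'
    · subst ha
      have ht : t ≠ [] := by intro h; subst h; simp at hl
      have hth : (t ++ pvDotIf cnt).head? ≠ some '.' := by
        cases t with
        | nil => exact absurd rfl ht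
        | cons b t' =>
          rcases hn.1 with h | h
          · simp at h
          · simpa using h
      have hgl : t.getLast? ≠ some '.' := by
        cases t with
        | nil => simp
        | cons b t' => rwa [List.getLast?_cons_cons] at hl
      have hin : List.dropWhile (fun c => c == '.') (('.' :: t) ++ pvDotIf cnt)
          = t ++ pvDotIf cnt := by
        rw [List.cons_append, List.dropWhile_cons]
        simp only [beq_self_eq_true, if_true]
        exact pv_dropWhile_dot_eq_self hth
      rw [hin, pv_rstrip_append_dotIf cnt hgl]
      simp
    · have hin : List.dropWhile (fun c => c == '.') ((a :: t) ++ pvDotIf cnt)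
          = (a :: t) ++ pvDotIf cnt :=
        pv_dropWhile_dot_eq_self (by simp [ha])
      rw [hin, pv_rstrip_append_dotIf cnt hl]
      simp [ha]

theorem pvRstripDot_of_last {v : List Char} (h : v.getLast? ≠ some '.') : pvRstripDot v = v := by
  unfold pvRstripDot
  rw [pv_dropWhile_dot_eq_self (by rwa [List.head?_reverse])]
  exact List.reverse_reverse v

theorem pv_a4_eq (s : List Char) :
    (if s.length ≠ 0 ∧ PySem.List.pyGet? s 0 = some '.'
     then PySem.List.slice s (some 1) (some s.length) else s)
    = if s.head? = some '.' then s.tail else s := by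
  cases s with
  | nil => simp
  | cons a t =>
    by_cases ha : a = '.'
    · subst ha
      rw [pv_slice_one_len _ (by simp)]
      simp
    · simp [PySem.List.pyGet?_zero_cons, ha]

theorem pv_a4b_noop (v : List Char) :
    (if v.length ≠ 0 ∧ PySem.List.pyGet? v ((v.length : Int) - 1) = some '.'
     then PySem.List.slice v (some 0) (some v.length) else v) = v := by
  split
  · rw [pv_slice_take _ _ (by omega)]
    simp
  · rfl

theorem pv_final_eq (n : List Char) (hne : n ≠ []) (hl : n.getLast? ≠ some '.') (hn : pvNoDD n) :
    (if n.length ≤ 2 then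
       (PySem.List.pyRange n.length 3 1).foldl
         (fun acc _ => acc ++ [PySem.List.pyGetD n ((n.length : Int) - 1) 'a']) n
     else if 16 ≤ n.length then
       (if PySem.List.pyGet? (PySem.List.slice n (some 0) (some 15)) 14 = some '.'
        then PySem.List.slice (PySem.List.slice n (some 0) (some 15)) none (some 14)
        else PySem.List.slice n (some 0) (some 15))
     else n)
    = pvRstripDot (PySem.List.slice
        (if n.length < 3 then n ++ List.replicate (3 - n.length) (PySem.List.pyGetD n (-1) 'a') else n)
        none (some 15)) := by
  by_cases h2 : n.length ≤ 2
  · rw [if_pos h2, if_pos (by omega)]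
    match n, hne, h2 with
    | [a], _, _ =>
      have ha : a ≠ '.' := by simpa using hl
      have hr : PySem.List.pyRange ((1:Nat) : Int) 3 1 = [1, 2] := by decide
      simp only [List.length_cons, List.length_nil, Nat.cast_ofNat, Nat.cast_one, hr]
      rw [pv_slice_none_take _ _ (by omega)]
      simp only [PySem.List.pyGetD_neg_one _ _ (by simp : ([a] : List Char) ≠ [])]
      norm_num [PySem.List.pyGetD_zero_cons, List.foldl]
      rw [pvRstripDot_of_last (by simp [ha])]
      · rfl
    | [a, b], _, _ =>
      have hb : b ≠ '.' := by simpa using hl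
      have hr : PySem.List.pyRange ((2:Nat) : Int) 3 1 = [2] := by decide
      simp only [List.length_cons, List.length_nil, hr]
      rw [pv_slice_none_take _ _ (by omega)]
      simp only [PySem.List.pyGetD_neg_one _ _ (by simp : ([a, b] : List Char) ≠ [])]
      rw [show ((2:Nat):Int) - 1 = ((1:Nat):Int) by norm_num, PySem.List.pyGetD_natCast]
      norm_num [List.foldl]
      rw [pvRstripDot_of_last (by simp [hb])]
      · rfl
  · rw [if_neg h2, if_neg (show ¬ n.length < 3 by omega)]
    by_cases h16 : 16 ≤ n.length
    · rw [if_pos h16]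
      have hw : PySem.List.slice n (some 0) (some 15) = n.take 15 := by
        rw [pv_slice_take _ _ (by omega)]; rfl
      have hwb : PySem.List.slice n none (some 15) = n.take 15 := by
        rw [pv_slice_none_take _ _ (by omega)]; rfl
      rw [hw, hwb]
      set w := n.take 15 with hwdef
      have hwl : w.length = 15 := by simp [hwdef]; omega
      have hwne : w ≠ [] := by intro h; rw [h] at hwl; simp at hwl
      have hnw : pvNoDD w := pvNoDD_take n 15 hn
      have hsplit : w.dropLast ++ [w.getLast hwne] = w := List.dropLast_append_getLast hwne
      have hul : w.dropLast.length = 14 := by simp [hwl]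
      have hidx : PySem.List.pyGet? w 14 = some (w.getLast hwne) := by
        conv_lhs => rw [← hsplit]
        rw [show (14:Int) = ((w.dropLast.length : Nat) : Int) by rw [hul]; norm_num]
        exact PySem.List.pyGet?_append_length _ _ _
      by_cases hx : w.getLast hwne = '.'
      · rw [if_pos (by rw [hidx, hx])]
        rw [pv_slice_none_take _ _ (by omega), show ((14:Int)).toNat = 14 by rfl]
        have hwdot : w.dropLast ++ ['.'] = w := by rw [← hx]; exact hsplit
        have hlast : w.dropLast.getLast? ≠ some '.' :=
          pvNoDD_last_of_append_dot (by rw [hwdot]; exact hnw)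
        have hrs : pvRstripDot w = w.dropLast := by
          unfold pvRstripDot
          conv_lhs => rw [← hwdot]
          rw [List.reverse_append]
          simp only [List.reverse_singleton, List.singleton_append, List.dropWhile_cons,
            beq_self_eq_true, if_true]
          rw [pv_dropWhile_dot_eq_self (by rwa [List.head?_reverse])]
          exact List.reverse_reverse _
        rw [hrs, List.dropLast_eq_take, hwl]
      · rw [if_neg (by rw [hidx]; simpa using hx)]
        rw [pvRstripDot_of_last (by rw [← hsplit, List.getLast?_concat]; simpa using hx)]
    · rw [if_neg h16]
      rw [pv_slice_none_take _ _ (by omega), show ((15:Int)).toNat = 15 by rfl,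
        List.take_of_length_le (by omega)]
      exact (pvRstripDot_of_last hl).symm

theorem pv_main (cs : List Char) : pvSolutionChars cs = pvSolutionAltChars cs := by
  unfold pvSolutionChars pvSolutionAltChars
  simp only []
  have hfilter : (PySem.Chars.lower cs).filter
        (fun c => pvAlpha.contains c || pvDigit.contains c || pvPunct.contains c)
      = (PySem.Chars.lower cs).filter pvBAllowed :=
    List.filter_congr (fun c _ => pv_allowed_eq c)
  set ws := (PySem.Chars.lower cs).filter pvBAllowed with hws
  have hA : (PySem.Chars.lower cs).foldl pvAStep2 [] = ws := by
    rw [pvA_filter, hfilter]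
  have hB : (PySem.Chars.lower cs).foldl pvBStep [] = ws.foldl pvGB [] := pvB_filter _
  rw [hA, hB]
  obtain ⟨hout, hc, hl, hn⟩ := pv_inv ws [] 0 le_rfl (by simp) trivial
  rw [show ([] : List Char) ++ pvDotIf 0 = [] from by simp [pvDotIf]] at hout
  rw [hout]
  set st := ws.foldl pvAStep3 ([], 0) with hst
  rw [pv_strip_eq st.2 hl hn, pv_a4_eq, pv_a4b_noop]
  set v := if st.1.head? = some '.' then st.1.tail else st.1 with hv
  have hvl : v.getLast? ≠ some '.' := by
    rw [hv]
    split
    · rename_i hh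
      cases hs : st.1 with
      | nil => simp
      | cons a t =>
        cases t with
        | nil =>
          rw [hs] at hh hl
          simp only [List.head?_cons, Option.some.injEq] at hh
          rw [hh] at hl
          simp at hl
        | cons b t' =>
          rw [hs] at hl
          rw [List.getLast?_cons_cons] at hl
          simpa using hl
    · exact hl
  have hvn : pvNoDD v := by
    rw [hv]
    split
    · cases hs : st.1 with
      | nil => trivial
      | cons a t =>
        rw [hs] at hn
        cases t with
        | nil => trivial
        | cons b t' => exact hn.2
    · exact hn
  have h0eq : (if v.length = 0 then v ++ ['a'] else v) = (if v = [] then ['a'] else v) := by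
    cases v <;> simp
  rw [h0eq]
  by_cases hve : v = []
  · rw [if_pos hve]
    exact pv_final_eq ['a'] (by simp) (by simp) trivial
  · rw [if_neg hve]
    exact pv_final_eq v hve hvl hvn

-- ===== VERDICT (by name: the statement is the Claim_ definition above) =====
theorem solution_spec : Claim_equal_solution := by
  intro new_id _
  unfold Spec_solution solution solution_alt
  rw [pv_main]
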